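-- pv_equiv track=rewrite | github.com/yaaawner/GG1delay | transform.py | sum_lambda
-- ===== SOURCE A (Python) =====
-- def sum_lambda(lambda_lists):
--     # copy lists
--     buf_lists = []
--     for l_list in lambda_lists:
--         buf_lists.append(l_list.copy())
--
--     # calculate max length
--     max_length = 0
--     for l_list in buf_lists:
--         length = len(l_list)
--         if length > max_length:
--             max_length = length
--
--     # equalise lists
--     for l_list in buf_lists:
--         for i in range(max_length - len(l_list)):
--             l_list.append(0)
--
--     return list(map(sum, zip(*buf_lists)))
-- ===== SOURCE B (Python) =====
-- def sum_lambda(lambda_lists):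
--     max_length = max((len(row) for row in lambda_lists), default=0)
--     result = [0] * max_length
--     for row in lambda_lists:
--         for i, v in enumerate(row):
--             result[i] += v
--     return result
-- ===== Notes on version B (the rewrite author's own statement) =====
-- stated objective: simpler
-- what changed: Replaces copy-pad-transpose (copying every list, padding each with zeros to the max length, then zip(*)+map(sum)) by direct row-wise accumulation into a single preallocated [0]*max_length accumulator; no copies, no padding, no transpose.
import Mathlib
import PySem

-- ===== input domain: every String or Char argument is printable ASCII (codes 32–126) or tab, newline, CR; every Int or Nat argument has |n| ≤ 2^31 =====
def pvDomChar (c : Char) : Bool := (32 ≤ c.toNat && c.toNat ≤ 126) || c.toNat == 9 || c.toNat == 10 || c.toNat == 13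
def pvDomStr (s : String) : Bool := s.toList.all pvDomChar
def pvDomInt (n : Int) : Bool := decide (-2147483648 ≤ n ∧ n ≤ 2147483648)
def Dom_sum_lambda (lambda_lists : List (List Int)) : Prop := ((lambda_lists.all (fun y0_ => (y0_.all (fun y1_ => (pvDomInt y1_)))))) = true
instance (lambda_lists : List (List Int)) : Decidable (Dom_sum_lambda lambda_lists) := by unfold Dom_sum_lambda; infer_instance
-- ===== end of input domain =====

-- B replaces A's copy / pad-with-zeros / zip(*)+map(sum) pipeline by direct row-wise
-- accumulation into one preallocated zero accumulator (objective: simpler).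

-- ===== PORT A =====
-- copy-pad-transpose, step for step.  l.copy() is the identity on immutable Lean lists;
-- the padding loop `for i in range(max_length-len(l)): l.append(0)` is appending that many zeros;
-- map(sum, zip(*buf)) is exact as the index map below: after padding every list has length
-- max_length, so zip(*buf) has exactly max_length tuples whose i-th components are the
-- elements at index i (and for buf = [] both sides are [], since max_length = 0).
def sum_lambda (lambda_lists : List (List Int)) : List Int :=
  let buf_lists := lambda_lists.map (fun l => l)
  let max_length := buf_lists.foldl (fun m l => if l.length > m then l.length else m) 0
  let padded := buf_lists.map (fun l => l ++ List.replicate (max_length - l.length) 0)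
  (List.range max_length).map (fun i => (padded.map (fun l => l.getD i 0)).sum)

-- ===== PORT B =====
-- inner loop `for i, v in enumerate(row): result[i] += v` (row never longer than result)
def pvAddInto : List Int → List Int → List Int
  | acc, [] => acc
  | [], _ :: _ => []
  | a :: as, v :: vs => (a + v) :: pvAddInto as vs

def sum_lambda_alt (lambda_lists : List (List Int)) : List Int :=
  let max_length := lambda_lists.foldl (fun m r => max m r.length) 0
  lambda_lists.foldl (fun result row => pvAddInto result row) (List.replicate max_length 0)

-- ===== PRECONDITION & SPEC =====
def Spec_sum_lambda (lambda_lists : List (List Int)) (out : List Int) : Prop := out = sum_lambda_alt lambda_lists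
instance (lambda_lists : List (List Int)) (out : List Int) : Decidable (Spec_sum_lambda lambda_lists out) := by unfold Spec_sum_lambda; infer_instance

-- ===== CLAIM (what is proved, stated in full; the proofs are below) =====
def Claim_equal_sum_lambda : Prop := ∀ (lambda_lists : List (List Int)), Dom_sum_lambda lambda_lists → Spec_sum_lambda lambda_lists (sum_lambda lambda_lists)

-- ===== LEMMAS AND PROOFS =====

-- A's max loop and B's max fold compute the same number
theorem maxFold_eq (ls : List (List Int)) :
    ls.foldl (fun m l => if l.length > m then l.length else m) 0
      = ls.foldl (fun m r => max m r.length) 0 := by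
  have h : (fun (m : Nat) (l : List Int) => if l.length > m then l.length else m)
      = fun m r => max m r.length := by
    funext m l; split_ifs <;> omega
  rw [h]

theorem le_foldl_max (ls : List (List Int)) (a : Nat) :
    a ≤ ls.foldl (fun m r => max m r.length) a := by
  induction ls generalizing a with
  | nil => simp
  | cons l ls ih => exact le_trans (le_max_left _ _) (ih (max a l.length))

theorem mem_le_foldl_max (ls : List (List Int)) (a : Nat) (r : List Int) (hr : r ∈ ls) :
    r.length ≤ ls.foldl (fun m r => max m r.length) a := by
  induction ls generalizing a with
  | nil => cases hr
  | cons l ls ih =>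
    rcases List.mem_cons.mp hr with rfl | h
    · exact le_trans (le_max_right _ _) (le_foldl_max ls (max a r.length))
    · exact ih (max a l.length) h

theorem pvAddInto_length (acc row : List Int) (h : row.length ≤ acc.length) :
    (pvAddInto acc row).length = acc.length := by
  induction acc generalizing row with
  | nil => cases row with
    | nil => rfl
    | cons v vs => simp at h
  | cons a as ih => cases row with
    | nil => rfl
    | cons v vs => simp [pvAddInto]; exact ih vs (by simpa using h)

theorem pvAddInto_getD (acc row : List Int) (h : row.length ≤ acc.length) (i : Nat) :
    (pvAddInto acc row).getD i 0 = acc.getD i 0 + row.getD i 0 := by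
  induction acc generalizing row i with
  | nil =>
    cases row with
    | nil => simp [pvAddInto]
    | cons v vs => simp at h
  | cons a as ih =>
    cases row with
    | nil => simp [pvAddInto]
    | cons v vs =>
      cases i with
      | zero => simp [pvAddInto]
      | succ j => simpa [pvAddInto] using ih vs (by simpa using h) j

theorem foldl_pvAddInto (rows : List (List Int)) (acc : List Int)
    (h : ∀ r ∈ rows, r.length ≤ acc.length) (i : Nat) :
    (rows.foldl (fun res row => pvAddInto res row) acc).length = acc.length ∧
    (rows.foldl (fun res row => pvAddInto res row) acc).getD i 0
      = acc.getD i 0 + (rows.map (fun r => r.getD i 0)).sum := by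
  induction rows generalizing acc with
  | nil => simp
  | cons r rows ih =>
    have hr : r.length ≤ acc.length := h r (by simp)
    have hlen := pvAddInto_length acc r hr
    have h' : ∀ s ∈ rows, s.length ≤ (pvAddInto acc r).length := by
      intro s hs; rw [hlen]; exact h s (by simp [hs])
    obtain ⟨hl, hg⟩ := ih (pvAddInto acc r) h'
    refine ⟨by simpa [hlen] using hl, ?_⟩
    simp only [List.foldl_cons] at *
    rw [hg, pvAddInto_getD acc r hr i, List.map_cons, List.sum_cons]
    ring

theorem getD_append_replicate (l : List Int) (k i : Nat) :
    (l ++ List.replicate k 0).getD i 0 = l.getD i 0 := by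
  induction l generalizing i with
  | nil =>
    cases i with
    | zero => cases k <;> simp [List.replicate]
    | succ j =>
      simp only [List.nil_append, List.getD_nil]
      cases Nat.lt_or_ge (j + 1) k with
      | inl h =>
        rw [List.getD_eq_getElem (List.replicate k 0) 0 (by simpa using h)]
        simp
      | inr h =>
        rw [List.getD_eq_default (List.replicate k 0) 0 (by simpa using h)]
  | cons a as ih =>
    cases i with
    | zero => rfl
    | succ j => simpa using ih j

theorem sum_lambda_spec' (lambda_lists : List (List Int)) :
    sum_lambda lambda_lists = sum_lambda_alt lambda_lists := by
  unfold sum_lambda sum_lambda_alt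
  set M := lambda_lists.foldl (fun m r => max m r.length) 0 with hM
  rw [List.map_id' lambda_lists]
  simp only [maxFold_eq, ← hM]
  have hacc : ∀ r ∈ lambda_lists, r.length ≤ (List.replicate M (0 : Int)).length := by
    intro r hr; simpa using mem_le_foldl_max lambda_lists 0 r hr
  apply List.ext_getElem
  · have := (foldl_pvAddInto lambda_lists (List.replicate M 0) hacc 0).1
    simpa using this.symm
  · intro i h1 h2
    have hiM : i < M := by simpa using h1
    have hg := (foldl_pvAddInto lambda_lists (List.replicate M 0) hacc i).2
    have hr : (List.replicate M (0 : Int)).getD i 0 = 0 := by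
      rw [List.getD_eq_getElem (List.replicate M 0) 0 (by simpa using hiM)]
      simp
    rw [List.getElem_map, ← List.getD_eq_getElem _ 0 h2, hg, hr, zero_add,
        List.getElem_range, List.map_map]
    congr 1
    apply List.map_congr_left
    intro l _
    simp only [Function.comp_apply]
    exact getD_append_replicate l (M - l.length) i

-- ===== VERDICT (by name: the statement is the Claim_ definition above) =====
theorem sum_lambda_spec : Claim_equal_sum_lambda := by
  intro lambda_lists _
  exact sum_lambda_spec' lambda_lists
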